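-- pv_equiv track=rewrite | github.com/stevenN1207/Taller-Diagramas | app.py | analizar_identificador
-- ===== SOURCE A (Python) =====
-- def analizar_identificador(palabra):
--     estados = ["stateDiagram-v2", "direction LR", "[*] --> 1"]
--     if not palabra:
--         return "\n".join(estados), " Entrada vacía"
--
--     if not palabra[0].isalpha():
--         estados.append("1 --> 3: " + palabra[0])
--         estados.append("3 --> [*]")
--         return "\n".join(estados), f" \"{palabra}\" no es válido: debe comenzar con una letra"
--
--     estados.append(f"1 --> 2: {palabra[0]}")
--     valido = True
--
--     for c in palabra[1:]:
--         if c.isalnum():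
--             estados.append(f"2 --> 2: {c}")
--         else:
--             estados.append(f"2 --> 3: {c}")
--             estados.append("3 --> [*]")
--             return "\n".join(estados), f" \"{palabra}\" no es válido: carácter inválido \"{c}\""
--
--     estados.append("2 --> 3: (otro)")
--     estados.append("3 --> [*]")
--
--     return "\n".join(estados), f" \"{palabra}\" es un identificador válido"
-- ===== SOURCE B (Python) =====
-- def analizar_identificador(palabra):
--     base = ["stateDiagram-v2", "direction LR", "[*] --> 1"]
--     if not palabra:
--         return "\n".join(base), " Entrada vacía"
--     if not palabra[0].isalpha():
--         lines = base + ["1 --> 3: " + palabra[0], "3 --> [*]"]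
--         return "\n".join(lines), f" \"{palabra}\" no es válido: debe comenzar con una letra"
--     rest = palabra[1:]
--     bad = next((i for i, c in enumerate(rest) if not c.isalnum()), None)
--     prefix = rest if bad is None else rest[:bad]
--     lines = base + [f"1 --> 2: {palabra[0]}"] + [f"2 --> 2: {c}" for c in prefix]
--     if bad is None:
--         lines += ["2 --> 3: (otro)", "3 --> [*]"]
--         msg = f" \"{palabra}\" es un identificador válido"
--     else:
--         lines += [f"2 --> 3: {rest[bad]}", "3 --> [*]"]
--         msg = f" \"{palabra}\" no es válido: carácter inválido \"{rest[bad]}\""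
--     return "\n".join(lines), msg
-- ===== Notes on version B (the rewrite author's own statement) =====
-- stated objective: alternative
-- what changed: Replaces A's append-while-scanning loop with early returns by a classify-then-construct shape: first find the index of the first invalid character (next/enumerate), then assemble the whole diagram and message in one step from that outcome.
import Mathlib
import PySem

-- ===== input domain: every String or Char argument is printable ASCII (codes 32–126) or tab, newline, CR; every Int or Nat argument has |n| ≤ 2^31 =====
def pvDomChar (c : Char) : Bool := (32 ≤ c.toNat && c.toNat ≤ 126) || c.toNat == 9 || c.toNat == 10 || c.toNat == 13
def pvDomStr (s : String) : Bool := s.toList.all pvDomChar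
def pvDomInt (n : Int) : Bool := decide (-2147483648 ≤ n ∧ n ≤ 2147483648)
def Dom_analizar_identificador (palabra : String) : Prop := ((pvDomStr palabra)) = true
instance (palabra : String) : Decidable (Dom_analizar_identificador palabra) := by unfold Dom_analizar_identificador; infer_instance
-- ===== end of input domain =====

-- B replaces A's append-while-scanning loop (early returns inside the scan) by a classify-then-construct
-- decomposition: find the first invalid character's index, then build the whole output in one step ("alternative").

-- ===== PORT A =====
-- A's for-loop over palabra[1:] with the growing `estados` accumulator and early return.
def pvALoop (palabra : String) : List Char → List String → String × String
  | [], estados =>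
      (PySem.Str.join "\n" (estados ++ ["2 --> 3: (otro)", "3 --> [*]"]),
       " \"" ++ palabra ++ "\" es un identificador válido")
  | c :: rest, estados =>
      if PySem.Chars.isalnum c then
        pvALoop palabra rest (estados ++ ["2 --> 2: " ++ String.ofList [c]])
      else
        (PySem.Str.join "\n" (estados ++ ["2 --> 3: " ++ String.ofList [c], "3 --> [*]"]),
         " \"" ++ palabra ++ "\" no es válido: carácter inválido \"" ++ String.ofList [c] ++ "\"")

def analizar_identificador (palabra : String) : String × String :=
  let estados := ["stateDiagram-v2", "direction LR", "[*] --> 1"]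
  match palabra.toList with
  | [] => (PySem.Str.join "\n" estados, " Entrada vacía")
  | c0 :: rest =>
      if ¬ PySem.Chars.isalpha c0 then
        (PySem.Str.join "\n" (estados ++ ["1 --> 3: " ++ String.ofList [c0]] ++ ["3 --> [*]"]),
         " \"" ++ palabra ++ "\" no es válido: debe comenzar con una letra")
      else
        pvALoop palabra rest (estados ++ ["1 --> 2: " ++ String.ofList [c0]])

-- ===== PORT B =====
def analizar_identificador_alt (palabra : String) : String × String :=
  let base := ["stateDiagram-v2", "direction LR", "[*] --> 1"]
  match palabra.toList with
  | [] => (PySem.Str.join "\n" base, " Entrada vacía")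
  | c0 :: rest =>
      if ¬ PySem.Chars.isalpha c0 then
        (PySem.Str.join "\n" (base ++ ["1 --> 3: " ++ String.ofList [c0], "3 --> [*]"]),
         " \"" ++ palabra ++ "\" no es válido: debe comenzar con una letra")
      else
        -- bad = next((i for i, c in enumerate(rest) if not c.isalnum()), None)
        match rest.findIdx? (fun c => ¬ PySem.Chars.isalnum c) with
        | none =>
            (PySem.Str.join "\n"
              (base ++ ["1 --> 2: " ++ String.ofList [c0]]
                    ++ rest.map (fun c => "2 --> 2: " ++ String.ofList [c])
                    ++ ["2 --> 3: (otro)", "3 --> [*]"]),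
             " \"" ++ palabra ++ "\" es un identificador válido")
        | some i =>
            let bad := PySem.List.pyGetD rest (i : Int) ' '
            (PySem.Str.join "\n"
              (base ++ ["1 --> 2: " ++ String.ofList [c0]]
                    ++ (rest.take i).map (fun c => "2 --> 2: " ++ String.ofList [c])
                    ++ ["2 --> 3: " ++ String.ofList [bad], "3 --> [*]"]),
             " \"" ++ palabra ++ "\" no es válido: carácter inválido \"" ++ String.ofList [bad] ++ "\"")

-- ===== PRECONDITION & SPEC =====
def Spec_analizar_identificador (palabra : String) (out : String × String) : Prop := out = analizar_identificador_alt palabra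
instance (palabra : String) (out : String × String) : Decidable (Spec_analizar_identificador palabra out) := by unfold Spec_analizar_identificador; infer_instance

-- ===== CLAIM (what is proved, stated in full; the proofs are below) =====
def Claim_equal_analizar_identificador : Prop := ∀ (palabra : String), Dom_analizar_identificador palabra → Spec_analizar_identificador palabra (analizar_identificador palabra)

-- ===== LEMMAS AND PROOFS =====

lemma pvGetD_cons_succ (c : Char) (rs : List Char) (i : Nat) (d : Char) :
    PySem.List.pyGetD (c :: rs) ((i : Int) + 1) d = rs[i]?.getD d := by
  have h : ((i : Int) + 1) = (((i + 1 : Nat)) : Int) := by push_cast; ring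
  rw [h, PySem.List.pyGetD_natCast]
  simp

lemma pvALoop_eq (palabra : String) (rest : List Char) : ∀ (acc : List String),
    pvALoop palabra rest acc =
      match rest.findIdx? (fun c => ¬ PySem.Chars.isalnum c) with
      | none =>
          (PySem.Str.join "\n"
            (acc ++ rest.map (fun c => "2 --> 2: " ++ String.ofList [c]) ++ ["2 --> 3: (otro)", "3 --> [*]"]),
           " \"" ++ palabra ++ "\" es un identificador válido")
      | some i =>
          let bad := PySem.List.pyGetD rest (i : Int) ' '
          (PySem.Str.join "\n"
            (acc ++ (rest.take i).map (fun c => "2 --> 2: " ++ String.ofList [c]) ++ ["2 --> 3: " ++ String.ofList [bad], "3 --> [*]"]),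
           " \"" ++ palabra ++ "\" no es válido: carácter inválido \"" ++ String.ofList [bad] ++ "\"") := by
  induction rest with
  | nil => intro acc; simp [pvALoop]
  | cons c rs ih =>
      intro acc
      by_cases hc : PySem.Chars.isalnum c = true
      · rw [show pvALoop palabra (c :: rs) acc
              = pvALoop palabra rs (acc ++ ["2 --> 2: " ++ String.ofList [c]]) by simp [pvALoop, hc]]
        rw [ih]
        rw [List.findIdx?_cons]
        simp only [hc]
        cases h : rs.findIdx? (fun c => ¬ PySem.Chars.isalnum c) with
        | none => simp
        | some i =>
            simp [List.take_succ_cons, pvGetD_cons_succ]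
      · simp [pvALoop, hc, List.findIdx?_cons, PySem.List.pyGetD_zero_cons]

-- ===== VERDICT (by name: the statement is the Claim_ definition above) =====
theorem analizar_identificador_spec : Claim_equal_analizar_identificador := by
  intro palabra _
  unfold Spec_analizar_identificador analizar_identificador analizar_identificador_alt
  cases h : palabra.toList with
  | nil => rfl
  | cons c0 rest =>
      by_cases ha : PySem.Chars.isalpha c0 = true
      · dsimp only
        rw [if_neg (by simp [ha]), if_neg (by simp [ha]), pvALoop_eq]
      · dsimp only
        rw [if_pos (by simp [ha]), if_pos (by simp [ha])]
        simp
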